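-- pv_equiv track=rewrite | github.com/fedebenassi/Filaments-EBUS | scripts/preprocessing.py | obtain_boxes_grouping
-- ===== SOURCE A (Python) =====
-- def obtain_boxes_grouping(regions):
--     list_lengths = [len(group) for group in regions.values()]
--
--     # Step 2: Generate a list of numbers from 1 to the total number of elements
--     total_elements = sum(list_lengths)
--     number_list = list(range(1, total_elements + 1))
--
--     # Step 3: Group the numbers according to the lengths of the values
--     grouped_numbers = []
--     start = 0
--     for length in list_lengths:
--         grouped_numbers.append(number_list[start:start + length])
--         start += length
--     return grouped_numbers
-- ===== SOURCE B (Python) =====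
-- def obtain_boxes_grouping(regions):
--     grouped_numbers = []
--     n = 1
--     for group in regions.values():
--         grouped_numbers.append(list(range(n, n + len(group))))
--         n += len(group)
--     return grouped_numbers
-- ===== Notes on version B (the rewrite author's own statement) =====
-- stated objective: simpler
-- what changed: B drops the precomputed 1..N number list, the total-sum pass and the slicing: a single loop with a running counter emits each consecutive group directly with range(n, n+len).
import Mathlib
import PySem

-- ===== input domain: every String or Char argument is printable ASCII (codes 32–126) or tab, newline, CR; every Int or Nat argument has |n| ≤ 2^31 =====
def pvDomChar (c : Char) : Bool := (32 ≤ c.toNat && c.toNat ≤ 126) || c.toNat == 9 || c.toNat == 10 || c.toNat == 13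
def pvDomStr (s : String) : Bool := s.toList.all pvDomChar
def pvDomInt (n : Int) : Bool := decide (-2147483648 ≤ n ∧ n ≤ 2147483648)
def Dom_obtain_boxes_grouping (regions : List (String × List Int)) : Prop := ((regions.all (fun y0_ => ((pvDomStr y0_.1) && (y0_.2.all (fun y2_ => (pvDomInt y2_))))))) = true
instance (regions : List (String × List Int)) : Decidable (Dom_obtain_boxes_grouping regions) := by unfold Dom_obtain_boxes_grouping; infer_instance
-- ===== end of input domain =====

-- B is simpler: one pass with a running counter generating each range directly,
-- instead of building the whole 1..N list and slicing it in a second pass.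

-- ===== PORT A =====
def obtain_boxes_grouping (regions : List (String × List Int)) : List (List Int) :=
  let list_lengths : List Int := regions.map (fun group => PySem.List.len group.2)
  let total_elements : Int := list_lengths.sum
  let number_list : List Int := PySem.List.pyRange 1 (total_elements + 1) 1
  (list_lengths.foldl
    (fun (st : List (List Int) × Int) length =>
      (st.1 ++ [PySem.List.slice number_list (some st.2) (some (st.2 + length))],
       st.2 + length))
    ([], 0)).1

-- ===== PORT B =====
def obtain_boxes_grouping_alt (regions : List (String × List Int)) : List (List Int) :=
  (regions.foldl
    (fun (st : List (List Int) × Int) group =>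
      (st.1 ++ [PySem.List.pyRange st.2 (st.2 + PySem.List.len group.2) 1],
       st.2 + PySem.List.len group.2))
    ([], 1)).1

-- ===== PRECONDITION & SPEC =====
def Spec_obtain_boxes_grouping (regions : List (String × List Int)) (out : List (List Int)) : Prop := out = obtain_boxes_grouping_alt regions
instance (regions : List (String × List Int)) (out : List (List Int)) : Decidable (Spec_obtain_boxes_grouping regions out) := by unfold Spec_obtain_boxes_grouping; infer_instance

-- ===== CLAIM (what is proved, stated in full; the proofs are below) =====
def Claim_equal_obtain_boxes_grouping : Prop := ∀ (regions : List (String × List Int)), Dom_obtain_boxes_grouping regions → Spec_obtain_boxes_grouping regions (obtain_boxes_grouping regions)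

-- ===== LEMMAS AND PROOFS =====

-- the slice of the precomputed 1..T list that A takes is exactly the range B generates
theorem pv_slice_range (T s n : Nat) (h : s + n ≤ T) :
    PySem.List.slice (PySem.List.pyRange 1 ((T : Int) + 1) 1) (some (s : Int))
      (some ((s : Int) + (n : Int)))
    = PySem.List.pyRange ((s : Int) + 1) ((s : Int) + 1 + (n : Int)) 1 := by
  rw [show ((s : Int) + (n : Int)) = ((s : Int) + ((n : Nat) : Int)) from rfl,
      PySem.List.slice_natCast_add, PySem.List.pyRange_one, PySem.List.pyRange_one]
  apply List.ext_getElem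
  · simp [List.length_take, List.length_drop]
    omega
  · intro k hk1 hk2
    simp only [List.getElem_take, List.getElem_drop, List.getElem_map, List.getElem_range]
    omega

-- the two folds, over the common list of group lengths, agree when A's counter trails B's by one
theorem pv_fold_eq (T : Nat) (N : List Nat) (s : Nat) (h : s + N.sum ≤ T)
    (acc : List (List Int)) :
    (N.foldl
      (fun (st : List (List Int) × Int) (n : Nat) =>
        (st.1 ++ [PySem.List.slice (PySem.List.pyRange 1 ((T : Int) + 1) 1)
                    (some st.2) (some (st.2 + (n : Int)))],
         st.2 + (n : Int)))
      (acc, (s : Int))).1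
    = (N.foldl
        (fun (st : List (List Int) × Int) (n : Nat) =>
          (st.1 ++ [PySem.List.pyRange st.2 (st.2 + (n : Int)) 1],
           st.2 + (n : Int)))
        (acc, (s : Int) + 1)).1 := by
  induction N generalizing s acc with
  | nil => rfl
  | cons n ns ih =>
    simp only [List.foldl_cons, List.sum_cons] at h ⊢
    rw [pv_slice_range T s n (by omega)]
    have hs : ((s : Int) + (n : Int)) = (((s + n : Nat)) : Int) := by push_cast; ring
    rw [hs, ih (s + n) (by omega)
      (acc ++ [PySem.List.pyRange ((s : Int) + 1) ((s : Int) + 1 + (n : Int)) 1])]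
    have h2 : (((s + n : Nat)) : Int) + 1 = (s : Int) + 1 + (n : Int) := by push_cast; ring
    rw [h2]

-- ===== VERDICT (by name: the statement is the Claim_ definition above) =====
theorem obtain_boxes_grouping_spec : Claim_equal_obtain_boxes_grouping := by
  intro regions _
  unfold Spec_obtain_boxes_grouping obtain_boxes_grouping obtain_boxes_grouping_alt
  simp only [PySem.List.len_eq]
  rw [show List.map (fun group : String × List Int => ((group.2.length : Int))) regions
        = (regions.map (fun g => g.2.length)).map (fun n : Nat => (n : Int)) by
      simp [List.map_map, Function.comp]]
  rw [List.foldl_map]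
  have hsum : ((regions.map (fun g => g.2.length)).map (fun n : Nat => (n : Int))).sum
      = (((regions.map (fun g => g.2.length)).sum : Nat) : Int) := by push_cast; rfl
  rw [hsum, show (0 : Int) = ((0 : Nat) : Int) from rfl,
      pv_fold_eq ((regions.map (fun g => g.2.length)).sum)
        (regions.map (fun g => g.2.length)) 0 (by omega) [],
      List.foldl_map]
  norm_num
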